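-- pv_equiv track=rewrite | github.com/derBobo/AOC | 2023/d07/d07.py | cards_to_index_part1
-- ===== SOURCE A (Python) =====
-- from collections import Counter
--
-- def cards_to_index_part1(cards):
--     counts = Counter(cards)
--     value = 0
--     most_common = counts.most_common(1)[0][1]
--     if len(counts) > 1:
--         second_common = counts.most_common(2)[1][1]
--     match most_common:
--         case 1:
--             value += 10000000000
--         case 2:
--             value += 20000000000
--             if second_common == 2:
--                 value += 10000000000
--         case 3:
--             value += 40000000000
--             if second_common == 2:
--                 value += 10000000000
--         case 4:
--             value += 60000000000
--         case 5:
--             value += 70000000000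
--     for i in range(5):
--         value += cards[i] * (100 ** (4 - i))
--     return value
-- ===== SOURCE B (Python) =====
-- def cards_to_index_part1(cards):
--     # sort-and-run-scan: track the two longest runs of the sorted hand in one pass
--     m1 = m2 = run = 0
--     prev = None
--     for c in sorted(cards):
--         if run and c == prev:
--             run += 1
--         else:
--             if run > m1:
--                 m1, m2 = run, m1
--             elif run > m2:
--                 m2 = run
--             run, prev = 1, c
--     if run > m1:
--         m1, m2 = run, m1
--     elif run > m2:
--         m2 = run
--     base = (0, 1, 2, 4, 6, 7)[m1] if m1 <= 5 else 0
--     if m1 in (2, 3) and m2 == 2: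
--         base += 1
--     value = 0
--     for i in range(5):
--         value = value * 100 + cards[i]
--     return base * 10000000000 + value
-- ===== Notes on version B (the rewrite author's own statement) =====
-- stated objective: alternative
-- what changed: B replaces Counter + most_common + the match/case cascade with sort-then-scan: it sorts the hand, finds the two longest equal runs in a single pass, reads the rank from a literal table, and accumulates the positional part by Horner's rule over range(5) instead of summing cards[i]*100**(4-i).
import Mathlib
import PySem

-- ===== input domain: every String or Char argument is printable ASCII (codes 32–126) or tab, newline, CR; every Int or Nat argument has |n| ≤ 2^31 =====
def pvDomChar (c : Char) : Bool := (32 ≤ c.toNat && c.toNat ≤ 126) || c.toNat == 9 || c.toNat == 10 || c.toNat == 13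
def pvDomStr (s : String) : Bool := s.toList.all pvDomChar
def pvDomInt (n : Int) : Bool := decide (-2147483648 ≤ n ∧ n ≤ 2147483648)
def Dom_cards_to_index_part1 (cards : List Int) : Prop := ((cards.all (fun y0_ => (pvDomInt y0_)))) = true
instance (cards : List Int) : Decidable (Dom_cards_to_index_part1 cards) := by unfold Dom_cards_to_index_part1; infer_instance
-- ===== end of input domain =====

-- B replaces Counter + most_common + the match/case cascade by sort-then-scan (one pass over the
-- sorted hand tracking the two longest equal runs, rank read from a literal table) and Horner's
-- rule for the positional part; same value on every 5-or-more-card hand (A raises on shorter input).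

-- ===== PORT A =====
-- Counter(cards); most_common(k) = sorted(items, key=count, reverse=True)[:k]
def cards_to_index_part1 (cards : List Int) : Int :=
  let counts := PySem.Dict.counter cards
  let mcAll := PySem.List.sorted counts.items (fun p => p.2) true
  let most_common : Int := ((PySem.List.pyGet? (mcAll.take 1) 0).getD (0, 0)).2
  let second_common : Int :=
    if 1 < counts.items.length then ((PySem.List.pyGet? (mcAll.take 2) 1).getD (0, 0)).2 else 0
  let value : Int :=
    if most_common = 1 then 10000000000
    else if most_common = 2 then 20000000000 + (if second_common = 2 then 10000000000 else 0)
    else if most_common = 3 then 40000000000 + (if second_common = 2 then 10000000000 else 0)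
    else if most_common = 4 then 60000000000
    else if most_common = 5 then 70000000000
    else 0
  (PySem.List.pyRange 0 5 1).foldl
    (fun v i => v + (PySem.List.pyGet? cards i).getD 0 * 100 ^ (4 - i).toNat) value

-- ===== PORT B =====
-- the loop state is (m1, m2, run, prev); 'if run and c == prev' extends the current run, otherwise
-- the finished run is folded into the two maxima and a new run starts; after the loop the last run
-- is folded in, the rank comes from a literal table, and cards[:5] is accumulated by Horner's rule
def cards_to_index_part1_alt (cards : List Int) : Int :=
  let st := (PySem.List.sorted cards (fun x => x) false).foldl
    (fun (st : Int × Int × Int × Option Int) c =>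
      if st.2.2.1 ≠ 0 ∧ st.2.2.2 = some c then (st.1, st.2.1, st.2.2.1 + 1, st.2.2.2)
      else
        let p := if st.2.2.1 > st.1 then (st.2.2.1, st.1)
                 else if st.2.2.1 > st.2.1 then (st.1, st.2.2.1) else (st.1, st.2.1)
        (p.1, p.2, 1, some c)) ((0 : Int), (0 : Int), (0 : Int), (none : Option Int))
  let p := if st.2.2.1 > st.1 then (st.2.2.1, st.1)
           else if st.2.2.1 > st.2.1 then (st.1, st.2.2.1) else (st.1, st.2.1)
  let m1 := p.1
  let m2 := p.2
  let base := if m1 ≤ 5 then (PySem.List.pyGet? [0, 1, 2, 4, 6, 7] m1).getD 0 else 0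
  let base := if (m1 = 2 ∨ m1 = 3) ∧ m2 = 2 then base + 1 else base
  base * 10000000000 +
    (PySem.List.pyRange 0 5 1).foldl (fun v i => v * 100 + (PySem.List.pyGet? cards i).getD 0) 0

-- ===== PRECONDITION & SPEC =====
-- Pre_ excludes hands of fewer than 5 cards, on all of which A raises (IndexError or UnboundLocalError).
def Pre_cards_to_index_part1 (cards : List Int) : Prop := 5 ≤ cards.length
instance (cards : List Int) : Decidable (Pre_cards_to_index_part1 cards) := by
  unfold Pre_cards_to_index_part1; infer_instance
def pvWitness_cards_to_index_part1 : List Int := [3, 3, 5, 7, 9]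

def Spec_cards_to_index_part1 (cards : List Int) (out : Int) : Prop := out = cards_to_index_part1_alt cards
instance (cards : List Int) (out : Int) : Decidable (Spec_cards_to_index_part1 cards out) := by unfold Spec_cards_to_index_part1; infer_instance

-- ===== CLAIM (what is proved, stated in full; the proofs are below) =====
def Claim_equal_cards_to_index_part1 : Prop := ∀ (cards : List Int), Dom_cards_to_index_part1 cards → Pre_cards_to_index_part1 cards → Spec_cards_to_index_part1 cards (cards_to_index_part1 cards)

-- ===== LEMMAS AND PROOFS =====

-- named copies of B's loop body and final flush (definitionally equal to the port's inline code)
def pvBStep (st : Int × Int × Int × Option Int) (c : Int) : Int × Int × Int × Option Int :=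
  if st.2.2.1 ≠ 0 ∧ st.2.2.2 = some c then (st.1, st.2.1, st.2.2.1 + 1, st.2.2.2)
  else
    let p := if st.2.2.1 > st.1 then (st.2.2.1, st.1)
             else if st.2.2.1 > st.2.1 then (st.1, st.2.2.1) else (st.1, st.2.1)
    (p.1, p.2, 1, some c)

def pvFin (st : Int × Int × Int × Option Int) : Int × Int :=
  if st.2.2.1 > st.1 then (st.2.2.1, st.1)
  else if st.2.2.1 > st.2.1 then (st.1, st.2.2.1) else (st.1, st.2.1)

def pvAltNice (cards : List Int) : Int :=
  let p := pvFin ((PySem.List.sorted cards (fun x => x) false).foldl pvBStep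
    ((0 : Int), (0 : Int), (0 : Int), (none : Option Int)))
  let base := if p.1 ≤ 5 then (PySem.List.pyGet? [0, 1, 2, 4, 6, 7] p.1).getD 0 else 0
  let base := if (p.1 = 2 ∨ p.1 = 3) ∧ p.2 = 2 then base + 1 else base
  base * 10000000000 +
    (PySem.List.pyRange 0 5 1).foldl (fun v i => v * 100 + (PySem.List.pyGet? cards i).getD 0) 0

theorem pvAlt_eq (cards : List Int) : cards_to_index_part1_alt cards = pvAltNice cards := rfl

-- keep the top two values seen so far
def pvStep (p : Int × Int) (x : Int) : Int × Int :=
  if x > p.1 then (x, p.1) else if x > p.2 then (p.1, x) else p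

def pvTop2 (l : List Int) : Int × Int := l.foldl pvStep (0, 0)

-- run lengths of a list (lengths of maximal blocks of equal adjacent elements)
def pvGo (prev run : Int) : List Int → List Int
  | [] => [run]
  | c :: t => if c = prev then pvGo prev (run + 1) t else run :: pvGo c 1 t

def pvRunLens : List Int → List Int
  | [] => []
  | c :: t => pvGo c 1 t

-- the multiset of counts of cards, as a list
def pvCounts (cards : List Int) : List Int :=
  (PySem.List.dedup cards).map (fun v => (cards.count v : Int))

theorem pvStep_pos {a b x : Int} (h : a < x) : pvStep (a, b) x = (x, a) := by
  simp [pvStep, h]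

theorem pvStep_mid {a b x : Int} (h1 : ¬ a < x) (h2 : b < x) : pvStep (a, b) x = (a, x) := by
  simp [pvStep, h1, h2]

theorem pvStep_skip {a b x : Int} (h1 : ¬ a < x) (h2 : ¬ b < x) : pvStep (a, b) x = (a, b) := by
  simp [pvStep, h1, h2]

theorem pvStep_comm (p : Int × Int) (x y : Int) :
    pvStep (pvStep p x) y = pvStep (pvStep p y) x := by
  rcases p with ⟨a, b⟩
  simp only [pvStep]
  split_ifs <;> simp_all [Prod.ext_iff] <;> omega

theorem pvFoldl_step_perm {l l' : List Int} (h : l.Perm l') (init : Int × Int) :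
    l.foldl pvStep init = l'.foldl pvStep init := by
  induction h generalizing init with
  | nil => rfl
  | cons x _ ih => exact ih _
  | swap x y l => simp only [List.foldl]; rw [pvStep_comm]
  | trans h1 h2 ih1 ih2 => rw [ih1, ih2]

-- the B scan computes the pvStep-fold of the run lengths
theorem pvScan_eq (l : List Int) (prev run m1 m2 : Int) (hrun : 1 ≤ run) :
    pvFin (l.foldl pvBStep (m1, m2, run, some prev))
    = (pvGo prev run l).foldl pvStep (m1, m2) := by
  induction l generalizing prev run m1 m2 with
  | nil =>
    show pvFin (m1, m2, run, some prev) = pvStep (m1, m2) run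
    unfold pvFin pvStep
    rfl
  | cons c t ih =>
    by_cases hc : prev = c
    · subst hc
      have hb : pvBStep (m1, m2, run, some prev) prev = (m1, m2, run + 1, some prev) := by
        unfold pvBStep
        rw [if_pos ⟨(by omega : run ≠ 0), rfl⟩]
      have hg : pvGo prev run (prev :: t) = pvGo prev (run + 1) t := by
        simp [pvGo]
      rw [hg, show List.foldl pvBStep (m1, m2, run, some prev) (prev :: t)
          = List.foldl pvBStep (pvBStep (m1, m2, run, some prev) prev) t from rfl, hb]
      exact ih prev (run + 1) m1 m2 (by omega)
    · have hb : pvBStep (m1, m2, run, some prev) c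
          = ((pvStep (m1, m2) run).1, (pvStep (m1, m2) run).2, 1, some c) := by
        unfold pvBStep
        rw [if_neg (fun h => hc (Option.some.inj h.2))]
        rfl
      have hg : pvGo prev run (c :: t) = run :: pvGo c 1 t := by
        simp [pvGo, show ¬ c = prev from fun h => hc h.symm]
      rw [hg, show List.foldl pvBStep (m1, m2, run, some prev) (c :: t)
          = List.foldl pvBStep (pvBStep (m1, m2, run, some prev) c) t from rfl, hb]
      rw [ih c 1 _ _ (le_refl 1)]
      rfl

theorem pvGo_eq (c : Int) (r : Int) (t : List Int) :
    pvGo c r t = (r + ((t.takeWhile (fun x => x == c)).length : Int))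
      :: pvRunLens (t.dropWhile (fun x => x == c)) := by
  induction t generalizing c r with
  | nil => simp [pvGo, pvRunLens]
  | cons x t ih =>
    by_cases hx : x = c
    · subst hx
      have h1 : pvGo x r (x :: t) = pvGo x (r + 1) t := by simp [pvGo]
      rw [h1, ih]
      have h2 : (x :: t).takeWhile (fun y => y == x) = x :: t.takeWhile (fun y => y == x) := by
        simp [List.takeWhile_cons]
      have h3 : (x :: t).dropWhile (fun y => y == x) = t.dropWhile (fun y => y == x) := by
        simp [List.dropWhile_cons]
      rw [h2, h3]
      congr 1
      simp only [List.length_cons]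
      push_cast
      ring
    · have h1 : pvGo c r (x :: t) = r :: pvGo x 1 t := by simp [pvGo, hx]
      have h2 : (x :: t).takeWhile (fun y => y == c) = [] := by
        simp [List.takeWhile_cons, hx]
      have h3 : (x :: t).dropWhile (fun y => y == c) = x :: t := by
        simp [List.dropWhile_cons, hx]
      rw [h1, h2, h3]
      simp [pvRunLens]

theorem pvRunLens_perm (s : List Int) (hs : s.Pairwise (· ≤ ·)) :
    (pvRunLens s).Perm (pvCounts s) := by
  generalize hn : s.length = n
  induction n using Nat.strong_induction_on generalizing s with
  | _ n ih =>
  match s, hs with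
  | [], _ => exact List.Perm.refl _
  | c :: t, hs =>
    have hct : ∀ x ∈ t, c ≤ x := (List.pairwise_cons.mp hs).1
    have ht : t.Pairwise (· ≤ ·) := (List.pairwise_cons.mp hs).2
    set t1 := t.takeWhile (fun x => x == c) with ht1def
    set u := t.dropWhile (fun x => x == c) with hudef
    have htu : t1 ++ u = t := List.takeWhile_append_dropWhile
    have hu_pair : u.Pairwise (· ≤ ·) := List.Pairwise.sublist (by rw [hudef]; exact List.dropWhile_sublist _) ht
    have ht1 : ∀ x ∈ t1, x = c := fun x hx => by
      have := List.mem_takeWhile_imp hx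
      simpa using this
    have hcu : ∀ x ∈ u, c < x := by
      have hgen : ∀ (l : List Int), (∀ y ∈ l, c ≤ y) → l.Pairwise (· ≤ ·) →
          ∀ x ∈ l.dropWhile (fun x => x == c), c < x := by
        intro l
        induction l with
        | nil => intro _ _ x hx; simp at hx
        | cons a l ih2 =>
          intro hle hp x hx
          by_cases hac : a = c
          · rw [List.dropWhile_cons] at hx
            simp only [hac, beq_self_eq_true, if_true] at hx
            exact ih2 (fun y hy => hle y (List.mem_cons_of_mem _ hy))
              (List.pairwise_cons.mp hp).2 x hx
          · have hfalse : (a == c) = false := by simpa using hac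
            simp only [List.dropWhile_cons, hfalse, Bool.false_eq_true, if_false] at hx
            rcases List.mem_cons.mp hx with rfl | hx'
            · exact lt_of_le_of_ne (hle x List.mem_cons_self) (fun h => hac h.symm)
            · have h1 : a ≤ x := (List.pairwise_cons.mp hp).1 x hx'
              have h2 : c ≤ a := hle a List.mem_cons_self
              omega
      rw [hudef]
      exact hgen t hct ht
    have hc_notin_u : c ∉ u := fun h => lt_irrefl c (hcu c h)
    have hcount_c : ((c :: t).count c : Int) = 1 + (t1.length : Int) := by
      have h1 : t.count c = t1.count c + u.count c := by
        rw [← htu, List.count_append]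
      have h2 : t1.count c = t1.length := by
        rw [List.count_eq_length]
        intro b hb
        simp [ht1 b hb]
      have h3 : u.count c = 0 := List.count_eq_zero.mpr hc_notin_u
      have h4 : (c :: t).count c = t.count c + 1 := List.count_cons_self
      omega
    have hcount_u : ∀ x ∈ u, (c :: t).count x = u.count x := by
      intro x hx
      have hxc : x ≠ c := fun h => by subst h; exact hc_notin_u hx
      have h1 : (c :: t).count x = (c :: t1).count x + u.count x := by
        have : c :: t = (c :: t1) ++ u := by rw [← htu]; rfl
        rw [this, List.count_append]
      have h2 : (c :: t1).count x = 0 := by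
        rw [List.count_eq_zero]
        intro hmem
        rcases List.mem_cons.mp hmem with rfl | hmem'
        · exact hxc rfl
        · exact hxc (ht1 x hmem')
      omega
    have hperm_dedup : (PySem.List.dedup (c :: t)).Perm (c :: PySem.List.dedup u) := by
      refine (List.perm_ext_iff_of_nodup (PySem.List.nodup_dedup _) ?_).mpr ?_
      · exact List.nodup_cons.mpr ⟨fun h => hc_notin_u ((PySem.List.mem_dedup _ _).mp h),
          PySem.List.nodup_dedup _⟩
      · intro a
        rw [PySem.List.mem_dedup, List.mem_cons, List.mem_cons, PySem.List.mem_dedup, ← htu,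
          List.mem_append]
        constructor
        · rintro (rfl | h1 | h2)
          · exact Or.inl rfl
          · exact Or.inl (ht1 a h1)
          · exact Or.inr h2
        · rintro (rfl | h)
          · exact Or.inl rfl
          · exact Or.inr (Or.inr h)
    have hlen_u : u.length < n := by
      have := (List.dropWhile_sublist (l := t) (fun x => x == c)).length_le
      simp only [← hudef] at this
      simp [← hn]
      omega
    have ihu : (pvRunLens u).Perm (pvCounts u) := ih u.length hlen_u u hu_pair rfl
    have hrl : pvRunLens (c :: t) = ((c :: t).count c : Int) :: pvRunLens u := by
      show pvGo c 1 t = _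
      rw [pvGo_eq, hcount_c]
    rw [hrl]
    refine List.Perm.trans (List.Perm.cons _ ihu) ?_
    have hmapu : pvCounts u = (PySem.List.dedup u).map (fun v => ((c :: t).count v : Int)) := by
      unfold pvCounts
      refine List.map_congr_left fun a ha => ?_
      rw [hcount_u a ((PySem.List.mem_dedup _ _).mp ha)]
    rw [hmapu]
    have : ((c :: t).count c : Int) :: (PySem.List.dedup u).map (fun v => ((c :: t).count v : Int))
        = (c :: PySem.List.dedup u).map (fun v => ((c :: t).count v : Int)) := rfl
    rw [this]
    exact (hperm_dedup.map _).symm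

theorem pvFoldl_step_noop (t : List Int) (a b : Int) (hb : ∀ x ∈ t, x ≤ b) (hab : b ≤ a) :
    t.foldl pvStep (a, b) = (a, b) := by
  induction t with
  | nil => rfl
  | cons x t ih =>
    have hx := hb x List.mem_cons_self
    rw [show List.foldl pvStep (a, b) (x :: t) = List.foldl pvStep (pvStep (a, b) x) t from rfl,
      pvStep_skip (by omega) (by omega)]
    exact ih (fun y hy => hb y (List.mem_cons_of_mem _ hy))

-- descending-sorted positive list: pvTop2 reads off the first two entries
theorem pvTop2_desc (d : List Int) (hd : d.Pairwise (fun a b => b ≤ a))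
    (hpos : ∀ x ∈ d, 1 ≤ x) :
    pvTop2 d = ((d.take 1).headD 0, (d.drop 1).headD 0) := by
  match d with
  | [] => rfl
  | [a] =>
    have ha := hpos a List.mem_cons_self
    show pvStep (0, 0) a = _
    rw [pvStep_pos (by omega)]
    rfl
  | a :: b :: t =>
    have ha := hpos a List.mem_cons_self
    have hb := hpos b (List.mem_cons_of_mem _ List.mem_cons_self)
    have hba : b ≤ a := (List.pairwise_cons.mp hd).1 b List.mem_cons_self
    have ht : ∀ x ∈ t, x ≤ b :=
      (List.pairwise_cons.mp (List.pairwise_cons.mp hd).2).1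
    show List.foldl pvStep (pvStep (pvStep (0, 0) a) b) t = _
    rw [pvStep_pos (show (0 : Int) < a by omega)]
    rw [pvStep_mid (show ¬ a < b by omega) (show (0 : Int) < b by omega)]
    rw [pvFoldl_step_noop t a b ht hba]
    rfl

-- A's most_common list, projected to counts, is the descending sort of pvCounts
theorem pvSig_eq (cards : List Int) :
    (PySem.List.sorted (PySem.Dict.counter cards).items (fun p => p.2) true).map (fun p : Int × Int => p.2)
    = PySem.List.sorted (pvCounts cards) (fun x => x) true := by
  have hV : (PySem.Dict.counter cards).items.map (fun p : Int × Int => p.2)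
      = (PySem.List.dedup cards).map (fun v => (cards.count v : Int)) := by
    rw [PySem.Dict.items_counter, PySem.List.dedup_eq_ofList, List.map_map]
    exact List.map_congr_left fun a _ => rfl
  have hperm : ((PySem.List.sorted (PySem.Dict.counter cards).items (fun p => p.2) true).map (fun p : Int × Int => p.2)).Perm
      (PySem.List.sorted (pvCounts cards) (fun x => x) true) := by
    refine (((PySem.List.sorted_perm _ _ _).map _).trans ?_).trans (PySem.List.sorted_perm _ _ _).symm
    rw [hV]
    exact List.Perm.refl _
  refine List.Perm.eq_of_pairwise (le := fun a b : Int => b ≤ a)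
    (fun a b _ _ h1 h2 => le_antisymm h2 h1) ?_ ?_ hperm
  · rw [List.pairwise_map]
    exact PySem.List.sorted_pairwise_rev _ _
  · exact PySem.List.sorted_pairwise_rev _ _

-- a single distinct card value: the descending count signature is just [length]
theorem pvSingleD (cards : List Int) (v : Int) (hd : PySem.List.dedup cards = [v]) :
    PySem.List.sorted (pvCounts cards) (fun x => x) true = [(cards.length : Int)] := by
  have hc : cards.count v = cards.length := by
    rw [List.count_eq_length]
    intro b hb
    have hm : b ∈ PySem.List.dedup cards := (PySem.List.mem_dedup cards b).mpr hb
    rw [hd, List.mem_singleton] at hm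
    simp [hm]
  unfold pvCounts
  rw [hd]
  simp [PySem.List.sorted, PySem.List.insertBy, hc]

-- a 5-or-more-card hand whose top count is 2 or 3 has at least two distinct values
theorem pvRestNe (cards : List Int) (m : Int) (rest : List Int) (h5 : 5 ≤ cards.length)
    (hD : PySem.List.sorted (pvCounts cards) (fun x => x) true = m :: rest)
    (hm : m = 2 ∨ m = 3) : rest ≠ [] := by
  intro hnil
  subst hnil
  have hlen : (pvCounts cards).length = 1 := by
    have := PySem.List.length_sorted (pvCounts cards) (fun x : Int => x) true
    rw [hD] at this
    simpa using this.symm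
  have hdl : (PySem.List.dedup cards).length = 1 := by
    unfold pvCounts at hlen
    simpa using hlen
  obtain ⟨v, hv⟩ : ∃ v, PySem.List.dedup cards = [v] := by
    rcases hd : PySem.List.dedup cards with _ | ⟨v, tl⟩
    · rw [hd] at hdl; simp at hdl
    · rw [hd] at hdl
      simp at hdl
      exact ⟨v, by rw [hdl]⟩
  have := pvSingleD cards v hv
  rw [hD] at this
  have hm5 : m = (cards.length : Int) := by injection this
  omega

theorem pvPosA (v0 a b c d e : Int) (t : List Int) :
    (PySem.List.pyRange 0 5 1).foldl
      (fun v i => v + (PySem.List.pyGet? (a::b::c::d::e::t) i).getD 0 * 100 ^ (4 - i).toNat) v0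
    = v0 + List.foldl (fun v c => v * 100 + c) 0 [a, b, c, d, e] := by
  have h5 : PySem.List.pyRange 0 5 1 = [0, 1, 2, 3, 4] := by decide
  have g0 : PySem.List.pyGet? (a::b::c::d::e::t) 0 = some a := by
    rw [show (0 : Int) = ((0 : Nat) : Int) from rfl, PySem.List.pyGet?_natCast]; rfl
  have g1 : PySem.List.pyGet? (a::b::c::d::e::t) 1 = some b := by
    rw [show (1 : Int) = ((1 : Nat) : Int) from rfl, PySem.List.pyGet?_natCast]; rfl
  have g2 : PySem.List.pyGet? (a::b::c::d::e::t) 2 = some c := by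
    rw [show (2 : Int) = ((2 : Nat) : Int) from rfl, PySem.List.pyGet?_natCast]; rfl
  have g3 : PySem.List.pyGet? (a::b::c::d::e::t) 3 = some d := by
    rw [show (3 : Int) = ((3 : Nat) : Int) from rfl, PySem.List.pyGet?_natCast]; rfl
  have g4 : PySem.List.pyGet? (a::b::c::d::e::t) 4 = some e := by
    rw [show (4 : Int) = ((4 : Nat) : Int) from rfl, PySem.List.pyGet?_natCast]; rfl
  rw [h5]
  simp only [List.foldl, g0, g1, g2, g3, g4, Option.getD_some]
  norm_num [show Int.toNat 4 = 4 from rfl, show Int.toNat 3 = 3 from rfl,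
    show Int.toNat 2 = 2 from rfl]
  ring

theorem pvPosB (a b c d e : Int) (t : List Int) :
    (PySem.List.pyRange 0 5 1).foldl
      (fun v i => v * 100 + (PySem.List.pyGet? (a::b::c::d::e::t) i).getD 0) 0
    = List.foldl (fun v c => v * 100 + c) 0 [a, b, c, d, e] := by
  have h5 : PySem.List.pyRange 0 5 1 = [0, 1, 2, 3, 4] := by decide
  have g0 : PySem.List.pyGet? (a::b::c::d::e::t) 0 = some a := by
    rw [show (0 : Int) = ((0 : Nat) : Int) from rfl, PySem.List.pyGet?_natCast]; rfl
  have g1 : PySem.List.pyGet? (a::b::c::d::e::t) 1 = some b := by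
    rw [show (1 : Int) = ((1 : Nat) : Int) from rfl, PySem.List.pyGet?_natCast]; rfl
  have g2 : PySem.List.pyGet? (a::b::c::d::e::t) 2 = some c := by
    rw [show (2 : Int) = ((2 : Nat) : Int) from rfl, PySem.List.pyGet?_natCast]; rfl
  have g3 : PySem.List.pyGet? (a::b::c::d::e::t) 3 = some d := by
    rw [show (3 : Int) = ((3 : Nat) : Int) from rfl, PySem.List.pyGet?_natCast]; rfl
  have g4 : PySem.List.pyGet? (a::b::c::d::e::t) 4 = some e := by
    rw [show (4 : Int) = ((4 : Nat) : Int) from rfl, PySem.List.pyGet?_natCast]; rfl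
  rw [h5]
  simp only [List.foldl, g0, g1, g2, g3, g4, Option.getD_some]

-- ===== VERDICT (by name: the statement is the Claim_ definition above) =====
theorem cards_to_index_part1_spec : Claim_equal_cards_to_index_part1 := by
  intro cards _ hpre
  unfold Pre_cards_to_index_part1 at hpre
  unfold Spec_cards_to_index_part1
  obtain ⟨a, b, c, d, e, t, rfl⟩ : ∃ a b c d e t, cards = a::b::c::d::e::t := by
    rcases cards with _ | ⟨a, cards⟩; · simp at hpre
    rcases cards with _ | ⟨b, cards⟩; · simp at hpre
    rcases cards with _ | ⟨c, cards⟩; · simp at hpre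
    rcases cards with _ | ⟨d, cards⟩; · simp at hpre
    rcases cards with _ | ⟨e, cards⟩; · simp at hpre
    exact ⟨a, b, c, d, e, cards, rfl⟩
  have hdne : PySem.List.dedup (a::b::c::d::e::t) ≠ [] := by
    intro hnil
    have hmem : a ∈ PySem.List.dedup (a::b::c::d::e::t) :=
      (PySem.List.mem_dedup _ a).mpr List.mem_cons_self
    rw [hnil] at hmem
    simp at hmem
  have hCne : pvCounts (a::b::c::d::e::t) ≠ [] := by
    unfold pvCounts
    simpa using hdne
  obtain ⟨m, rest, hD⟩ : ∃ m rest,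
      PySem.List.sorted (pvCounts (a::b::c::d::e::t)) (fun x => x) true = m :: rest := by
    rcases hx : PySem.List.sorted (pvCounts (a::b::c::d::e::t)) (fun x => x) true with _ | ⟨m, rest⟩
    · rw [PySem.List.sorted_eq_nil_iff] at hx
      exact absurd hx hCne
    · exact ⟨m, rest, rfl⟩
  -- positivity and ordering of the descending count signature
  have hDpos : ∀ x ∈ PySem.List.sorted (pvCounts (a::b::c::d::e::t)) (fun x => x) true, 1 ≤ x := by
    intro x hx
    rw [PySem.List.mem_sorted] at hx
    unfold pvCounts at hx
    obtain ⟨v, hv, rfl⟩ := List.mem_map.mp hx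
    have : v ∈ (a::b::c::d::e::t) := (PySem.List.mem_dedup _ v).mp hv
    have : 0 < (a::b::c::d::e::t).count v := List.count_pos_iff.mpr this
    omega
  have hDdesc : (PySem.List.sorted (pvCounts (a::b::c::d::e::t)) (fun x => x) true).Pairwise
      (fun x y : Int => y ≤ x) := PySem.List.sorted_pairwise_rev _ _
  -- ===== B side: the scan state is (m, rest.headD 0)
  have hs_ne : PySem.List.sorted (a::b::c::d::e::t) (fun x => x) false ≠ [] := by
    rw [Ne, PySem.List.sorted_eq_nil_iff]
    simp
  obtain ⟨c0, s', hs⟩ : ∃ c0 s',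
      PySem.List.sorted (a::b::c::d::e::t) (fun x => x) false = c0 :: s' := by
    rcases hx : PySem.List.sorted (a::b::c::d::e::t) (fun x => x) false with _ | ⟨c0, s'⟩
    · exact absurd hx hs_ne
    · exact ⟨c0, s', rfl⟩
  have hfirst : pvBStep ((0 : Int), (0 : Int), (0 : Int), (none : Option Int)) c0
      = (0, 0, 1, some c0) := by
    unfold pvBStep
    rw [if_neg (fun h => h.1 rfl)]
    simp
  have hp : pvFin ((PySem.List.sorted (a::b::c::d::e::t) (fun x => x) false).foldl pvBStep
        ((0 : Int), (0 : Int), (0 : Int), (none : Option Int)))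
      = pvTop2 (pvRunLens (PySem.List.sorted (a::b::c::d::e::t) (fun x => x) false)) := by
    rw [hs, show List.foldl pvBStep ((0 : Int), (0 : Int), (0 : Int), (none : Option Int)) (c0 :: s')
        = List.foldl pvBStep (pvBStep (0, 0, 0, none) c0) s' from rfl, hfirst,
      pvScan_eq s' c0 1 0 0 (le_refl 1)]
    rfl
  have hsorted_pair : (PySem.List.sorted (a::b::c::d::e::t) (fun x => x) false).Pairwise (· ≤ ·) :=
    PySem.List.sorted_pairwise _ _
  have hperm1 := pvRunLens_perm _ hsorted_pair
  have hded : (PySem.List.dedup (PySem.List.sorted (a::b::c::d::e::t) (fun x => x) false)).Perm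
      (PySem.List.dedup (a::b::c::d::e::t)) := by
    refine (List.perm_ext_iff_of_nodup (PySem.List.nodup_dedup _) (PySem.List.nodup_dedup _)).mpr ?_
    intro x
    rw [PySem.List.mem_dedup, PySem.List.mem_dedup, PySem.List.mem_sorted]
  have hperm2 : (pvCounts (PySem.List.sorted (a::b::c::d::e::t) (fun x => x) false)).Perm
      (pvCounts (a::b::c::d::e::t)) := by
    unfold pvCounts
    rw [List.map_congr_left (fun v _ => by
      rw [(PySem.List.sorted_perm (a::b::c::d::e::t) (fun x => x) false).count_eq v])]
    exact hded.map _
  have hperm3 : (pvCounts (a::b::c::d::e::t)).Perm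
      (PySem.List.sorted (pvCounts (a::b::c::d::e::t)) (fun x => x) true) :=
    (PySem.List.sorted_perm _ _ _).symm
  have htop : pvFin ((PySem.List.sorted (a::b::c::d::e::t) (fun x => x) false).foldl pvBStep
        ((0 : Int), (0 : Int), (0 : Int), (none : Option Int))) = (m, rest.headD 0) := by
    rw [hp]
    unfold pvTop2
    rw [pvFoldl_step_perm ((hperm1.trans hperm2).trans hperm3) _]
    rw [show List.foldl pvStep (0, 0)
        (PySem.List.sorted (pvCounts (a::b::c::d::e::t)) (fun x => x) true)
        = pvTop2 (PySem.List.sorted (pvCounts (a::b::c::d::e::t)) (fun x => x) true) from rfl]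
    rw [pvTop2_desc _ hDdesc hDpos, hD]
    rfl
  -- ===== A side: most_common = m, second_common = rest.headD 0 when it exists
  have hA_map : (PySem.List.sorted (PySem.Dict.counter (a::b::c::d::e::t)).items
      (fun p => p.2) true).map (fun p : Int × Int => p.2) = m :: rest := by
    rw [pvSig_eq, hD]
  obtain ⟨q, qs, hmc⟩ : ∃ q qs, PySem.List.sorted (PySem.Dict.counter (a::b::c::d::e::t)).items
      (fun p => p.2) true = q :: qs := by
    rcases hy : PySem.List.sorted (PySem.Dict.counter (a::b::c::d::e::t)).items
      (fun p => p.2) true with _ | ⟨q, qs⟩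
    · rw [hy] at hA_map; simp at hA_map
    · exact ⟨q, qs, rfl⟩
  rw [hmc] at hA_map
  simp only [List.map_cons, List.cons.injEq] at hA_map
  obtain ⟨hq2, hqs⟩ := hA_map
  have hlen_items : (PySem.Dict.counter (a::b::c::d::e::t)).items.length
      = (PySem.List.dedup (a::b::c::d::e::t)).length := by
    rw [PySem.Dict.items_counter, List.length_map, PySem.List.dedup_eq_ofList]
  have hlen_rest : qs.length = rest.length := by
    have := congrArg List.length hqs
    simpa using this
  have hlen_D : rest.length + 1 = (PySem.List.dedup (a::b::c::d::e::t)).length := by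
    have h1 := PySem.List.length_sorted (pvCounts (a::b::c::d::e::t)) (fun x : Int => x) true
    rw [hD] at h1
    unfold pvCounts at h1
    simpa using h1
  -- ===== assemble
  show cards_to_index_part1 (a::b::c::d::e::t) = cards_to_index_part1_alt (a::b::c::d::e::t)
  rw [pvAlt_eq]
  simp only [cards_to_index_part1, pvAltNice]
  rw [htop, hmc]
  have hmost : ((PySem.List.pyGet? ((q :: qs).take 1) 0).getD (0, 0)).2 = m := by
    simp [hq2]
  rw [hmost, pvPosA, pvPosB]
  congr 1
  -- value = base * 10^10, case by case on m
  by_cases hm23 : m = 2 ∨ m = 3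
  · have hrest_ne : rest ≠ [] := pvRestNe (a::b::c::d::e::t) m rest (by simp) hD hm23
    obtain ⟨r, rest', rfl⟩ : ∃ r rest', rest = r :: rest' := by
      rcases rest with _ | ⟨r, rest'⟩
      · exact absurd rfl hrest_ne
      · exact ⟨r, rest', rfl⟩
    obtain ⟨q2, qs', rfl⟩ : ∃ q2 qs', qs = q2 :: qs' := by
      rcases qs with _ | ⟨q2, qs'⟩
      · simp at hlen_rest
      · exact ⟨q2, qs', rfl⟩
    have hq22 : q2.2 = r := by
      simp only [List.map_cons, List.cons.injEq] at hqs
      exact hqs.1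
    have hif : 1 < (PySem.Dict.counter (a::b::c::d::e::t)).items.length := by
      rw [hlen_items]
      simp only [List.length_cons] at hlen_D
      omega
    rw [if_pos hif]
    have hsecond : ((PySem.List.pyGet? ((q :: q2 :: qs').take 2) 1).getD (0, 0)).2 = r := by
      have hg : PySem.List.pyGet? [q, q2] 1 = some q2 := by
        rw [show (1 : Int) = ((1 : Nat) : Int) from rfl, PySem.List.pyGet?_natCast]
        rfl
      simp only [List.take]
      rw [hg]
      simp [hq22]
    rw [hsecond]
    rcases hm23 with rfl | rfl
    · have htab : (PySem.List.pyGet? [(0 : Int), 1, 2, 4, 6, 7] 2).getD 0 = 2 := by decide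
      rw [if_pos (by norm_num : (2 : Int) ≤ 5), htab]
      by_cases h2 : r = 2 <;> simp [h2]
    · have htab : (PySem.List.pyGet? [(0 : Int), 1, 2, 4, 6, 7] 3).getD 0 = 4 := by decide
      rw [if_pos (by norm_num : (3 : Int) ≤ 5), htab]
      by_cases h2 : r = 2 <;> simp [h2]
  · have hm1 : 1 ≤ m := by
      have : m ∈ PySem.List.sorted (pvCounts (a::b::c::d::e::t)) (fun x => x) true := by
        rw [hD]; exact List.mem_cons_self
      exact hDpos m this
    rw [not_or] at hm23
    obtain ⟨hne2, hne3⟩ := hm23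
    by_cases h1 : m = 1
    · subst h1
      norm_num
    · by_cases h4 : m = 4
      · subst h4
        norm_num
        decide
      · by_cases hm5 : m = 5
        · subst hm5
          norm_num
          decide
        · have hm6 : 6 ≤ m := by omega
          rw [if_neg h1, if_neg hne2, if_neg hne3, if_neg h4, if_neg hm5,
            if_neg (by omega : ¬ m ≤ 5)]
          simp [hne2, hne3]
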